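-- pv_equiv track=rewrite | github.com/WHT413/E2E_ChessCobotSystem | ChessRobot/chessrobotO.py | _compress_row_to_fen
-- ===== SOURCE A (Python) =====
-- from typing import Any, Dict, List, Tuple, Optional
--
-- def _compress_row_to_fen(row_chars: List[str]) -> str:
--     """Compress '.' runs to digits to produce a FEN row."""
--     fen_row, run = [], 0
--     for ch in row_chars:
--         if ch == ".":
--             run += 1
--         else:
--             if run:
--                 fen_row.append(str(run))
--                 run = 0
--             fen_row.append(ch)
--     if run:
--         fen_row.append(str(run))
--     return "".join(fen_row)
-- ===== SOURCE B (Python) =====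
-- from typing import List
--
-- def _compress_row_to_fen(row_chars: List[str]) -> str:
--     """FEN row via non-dot positions: keep (index, piece) pairs, render dot
--     runs as index gaps between consecutive kept positions."""
--     pieces = [(i, ch) for i, ch in enumerate(row_chars) if ch != "."]
--     parts, prev = [], -1
--     for i, ch in pieces:
--         gap = i - prev - 1
--         if gap:
--             parts.append(str(gap))
--         parts.append(ch)
--         prev = i
--     gap = len(row_chars) - prev - 1
--     if gap:
--         parts.append(str(gap))
--     return "".join(parts)
-- ===== Notes on version B (the rewrite author's own statement) =====
-- stated objective: alternative
-- what changed: Instead of a single pass with a running dot-counter that is flushed, B first extracts the (index, piece) pairs of non-dot elements and then renders each dot run as the arithmetic gap between consecutive kept indices (plus a trailing gap), so no run counter is ever maintained.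
import Mathlib
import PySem

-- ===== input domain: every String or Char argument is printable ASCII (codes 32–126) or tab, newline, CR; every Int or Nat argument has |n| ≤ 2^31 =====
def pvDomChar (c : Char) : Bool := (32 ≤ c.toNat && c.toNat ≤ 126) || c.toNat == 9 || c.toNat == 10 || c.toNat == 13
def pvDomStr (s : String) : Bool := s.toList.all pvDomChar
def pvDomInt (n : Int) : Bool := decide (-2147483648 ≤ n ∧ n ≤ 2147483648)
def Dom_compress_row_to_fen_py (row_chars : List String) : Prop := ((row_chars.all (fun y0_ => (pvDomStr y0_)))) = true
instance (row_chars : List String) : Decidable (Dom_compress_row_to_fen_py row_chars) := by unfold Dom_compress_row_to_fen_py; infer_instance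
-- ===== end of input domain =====

-- B drops A's running dot-counter: it first extracts the (index, piece) pairs of
-- non-dot elements, then renders each dot run as the index gap between
-- consecutive kept positions (alternative decomposition, same cost).

-- ===== PORT A =====
-- loop body: 'if ch == ".": run += 1 else: (flush run) ; append ch'
def pvStepA (st : List String × Int) (ch : String) : List String × Int :=
  if ch = "." then (st.1, st.2 + 1)
  else
    let fen := if st.2 ≠ 0 then st.1 ++ [PySem.Int.toStr st.2] else st.1
    (fen ++ [ch], (0 : Int))

def compress_row_to_fen_py (row_chars : List String) : String :=
  let st := row_chars.foldl pvStepA ([], (0 : Int))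
  let fen := if st.2 ≠ 0 then st.1 ++ [PySem.Int.toStr st.2] else st.1
  PySem.Str.join "" fen

-- ===== PORT B =====
-- loop body: 'gap = i - prev - 1; if gap: append str(gap); append ch; prev = i'
def pvStepB (st : List String × Int) (p : Int × String) : List String × Int :=
  let gap := p.1 - st.2 - 1
  let parts := if gap ≠ 0 then st.1 ++ [PySem.Int.toStr gap] else st.1
  (parts ++ [p.2], p.1)

def compress_row_to_fen_py_alt (row_chars : List String) : String :=
  let pieces := (PySem.List.enumerate row_chars).filter (fun q => q.2 ≠ ".")
  let st := pieces.foldl pvStepB ([], (-1 : Int))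
  let gap := (row_chars.length : Int) - st.2 - 1
  let parts := if gap ≠ 0 then st.1 ++ [PySem.Int.toStr gap] else st.1
  PySem.Str.join "" parts

-- ===== PRECONDITION & SPEC =====
def Spec_compress_row_to_fen_py (row_chars : List String) (out : String) : Prop := out = compress_row_to_fen_py_alt row_chars
instance (row_chars : List String) (out : String) : Decidable (Spec_compress_row_to_fen_py row_chars out) := by unfold Spec_compress_row_to_fen_py; infer_instance

-- ===== CLAIM (what is proved, stated in full; the proofs are below) =====
def Claim_equal_compress_row_to_fen_py : Prop := ∀ (row_chars : List String), Dom_compress_row_to_fen_py row_chars → Spec_compress_row_to_fen_py row_chars (compress_row_to_fen_py row_chars)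

-- ===== LEMMAS AND PROOFS =====

-- A's final flush of the run counter
def pvFinalA (st : List String × Int) : List String :=
  if st.2 ≠ 0 then st.1 ++ [PySem.Int.toStr st.2] else st.1

-- B's trailing-gap finish, with e the index one past the processed segment
def pvFinalB (st : List String × Int) (e : Int) : List String :=
  if e - st.2 - 1 ≠ 0 then st.1 ++ [PySem.Int.toStr (e - st.2 - 1)] else st.1

-- invariant: processing l at positions [p, p+|l|), with A's counter equal to
-- the gap p - prev - 1 since B's last kept index prev, both finishes agree
theorem pv_main (l : List String) : ∀ (parts : List String) (prev p : Int),
    pvFinalA (l.foldl pvStepA (parts, p - prev - 1)) =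
    pvFinalB (((PySem.List.enumerate l p).filter (fun q => q.2 ≠ ".")).foldl pvStepB (parts, prev))
      (p + l.length) := by
  induction l with
  | nil =>
      intro parts prev p
      simp [PySem.List.enumerate_nil, pvFinalA, pvFinalB]
  | cons ch l ih =>
      intro parts prev p
      rw [PySem.List.enumerate_cons]
      by_cases hc : ch = "."
      · subst hc
        have hA : pvStepA (parts, p - prev - 1) "." = (parts, (p + 1) - prev - 1) := by
          simp only [pvStepA]
          simp
          try omega
        rw [List.foldl_cons, hA,
          show List.filter (fun q => q.2 ≠ ".") (((p : Int), (".":String)) :: PySem.List.enumerate l (p+1))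
            = List.filter (fun q => q.2 ≠ ".") (PySem.List.enumerate l (p+1)) from by simp,
          ih parts prev (p + 1)]
        congr 1
        simp only [List.length_cons]
        push_cast
        omega
      · have hA : pvStepA (parts, p - prev - 1) ch =
            ((if p - prev - 1 ≠ 0 then parts ++ [PySem.Int.toStr (p - prev - 1)] else parts)
              ++ [ch], (p + 1) - p - 1) := by
          simp only [pvStepA]
          simp [hc]
          try omega
        have hB : pvStepB (parts, prev) (p, ch) =
            ((if p - prev - 1 ≠ 0 then parts ++ [PySem.Int.toStr (p - prev - 1)] else parts)
              ++ [ch], p) := by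
          simp [pvStepB]
        rw [List.foldl_cons, hA,
          show List.filter (fun q => q.2 ≠ ".") (((p : Int), ch) :: PySem.List.enumerate l (p+1))
            = ((p : Int), ch) :: List.filter (fun q => q.2 ≠ ".") (PySem.List.enumerate l (p+1)) from by
              simp [hc],
          List.foldl_cons, hB,
          ih ((if p - prev - 1 ≠ 0 then parts ++ [PySem.Int.toStr (p - prev - 1)] else parts) ++ [ch]) p (p + 1)]
        congr 1
        simp only [List.length_cons]
        push_cast
        omega

-- ===== VERDICT (by name: the statement is the Claim_ definition above) =====
theorem compress_row_to_fen_py_spec : Claim_equal_compress_row_to_fen_py := by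
  intro row_chars _
  show compress_row_to_fen_py row_chars = compress_row_to_fen_py_alt row_chars
  have h := pv_main row_chars [] (-1) 0
  simp only [show (0 : Int) - (-1) - 1 = 0 from by ring, zero_add] at h
  simp only [compress_row_to_fen_py, compress_row_to_fen_py_alt, pvFinalA, pvFinalB] at *
  rw [h]
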